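-- pv_equiv track=rewrite | github.com/Nikil263/Assignment2_NLP | utils/ngrams.py | n10
-- ===== SOURCE A (Python) =====
-- def n10(z,q,f10):
--     r51=[]
--     r55=[]
--     r510=[]
--     co=0
--     for a, b, c, d, e, f, g, h, i, j in f10:
--
--         if(h == z and i == q and j!= None):
--             co=co+1
--             if(co==1):
--                 r51.append(e)
--             if(co<=5):
--                 r55.append(e)
--             if(co<=10):
--                 r510.append(e)
--     return r51,r55,r510
-- ===== SOURCE B (Python) =====
-- def n10(z, q, f10):
--     def first(k, rows):
--         # at most k matching e-values from rows, stopping the scan as soon as k are found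
--         if k == 0 or not rows:
--             return []
--         a, b, c, d, e, f, g, h, i, j = rows[0]
--         rest = rows[1:]
--         if h == z and i == q and j != None:
--             return [e] + first(k - 1, rest)
--         return first(k, rest)
--     ten = first(10, f10)
--     return ten[:1], ten[:5], ten[:10]
-- ===== Notes on version B (the rewrite author's own statement) =====
-- stated objective: alternative
-- what changed: Replaces A's full-scan loop with a counter and three threshold-gated appends by a recursive budgeted search that stops scanning as soon as the first 10 matches are found, the 1- and 5-element answers being prefixes of that result.
import Mathlib
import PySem

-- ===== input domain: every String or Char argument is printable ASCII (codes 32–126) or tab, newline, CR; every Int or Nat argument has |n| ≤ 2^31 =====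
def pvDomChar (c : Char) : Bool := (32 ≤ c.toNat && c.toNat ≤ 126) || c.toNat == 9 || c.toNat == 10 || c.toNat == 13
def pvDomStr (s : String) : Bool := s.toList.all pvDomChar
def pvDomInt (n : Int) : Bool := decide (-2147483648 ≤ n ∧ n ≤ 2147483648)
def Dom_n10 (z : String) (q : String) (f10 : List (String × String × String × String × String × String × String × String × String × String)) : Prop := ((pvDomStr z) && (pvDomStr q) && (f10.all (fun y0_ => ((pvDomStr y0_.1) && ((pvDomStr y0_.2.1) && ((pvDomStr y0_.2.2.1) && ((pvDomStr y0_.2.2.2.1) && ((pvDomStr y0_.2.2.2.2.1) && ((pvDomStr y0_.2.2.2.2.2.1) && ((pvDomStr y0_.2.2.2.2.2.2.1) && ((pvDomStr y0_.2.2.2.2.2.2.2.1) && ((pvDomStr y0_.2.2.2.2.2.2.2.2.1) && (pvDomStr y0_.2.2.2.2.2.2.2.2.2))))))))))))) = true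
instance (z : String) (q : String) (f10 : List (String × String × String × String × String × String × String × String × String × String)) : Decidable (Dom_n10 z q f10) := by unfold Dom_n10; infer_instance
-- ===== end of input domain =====

-- B replaces A's full-scan counter loop by a recursive budgeted search that stops scanning at the
-- 10th match; the 1- and 5-element answers are prefixes of its result.  (objective: alternative)
-- In both ports the Python test `j != None` is always true (j is a string) and is ported as such.

-- ===== PORT A =====
-- A's loop body: one row updates (r51, r55, r510, co)
def n10Step (z : String) (q : String)
    (st : List String × List String × List String × Int)
    (row : String × String × String × String × String × String × String × String × String × String) :
    List String × List String × List String × Int :=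
  match st, row with
  | (r51, r55, r510, co), (_a, _b, _c, _d, e, _f, _g, h, i, _j) =>
    if h = z ∧ i = q then  -- `j != None` is always true for a string j
      let co := co + 1
      let r51 := if co = 1 then r51 ++ [e] else r51
      let r55 := if co ≤ 5 then r55 ++ [e] else r55
      let r510 := if co ≤ 10 then r510 ++ [e] else r510
      (r51, r55, r510, co)
    else (r51, r55, r510, co)

def n10 (z : String) (q : String) (f10 : List (String × String × String × String × String × String × String × String × String × String)) : List String × List String × List String :=
  let st := f10.foldl (n10Step z q) ([], [], [], 0)
  (st.1, st.2.1, st.2.2.1)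

-- ===== PORT B =====
-- Source B's `first(k, rows)`: at most k matching e-values, stopping the scan as soon as k are found
def n10First (z : String) (q : String) :
    Nat → List (String × String × String × String × String × String × String × String × String × String) → List String
  | 0, _ => []
  | _, [] => []
  | Nat.succ k, (_a, _b, _c, _d, e, _f, _g, h, i, _j) :: rest =>
    if h = z ∧ i = q then  -- `j != None` is always true for a string j
      e :: n10First z q k rest
    else
      n10First z q (k + 1) rest

def n10_alt (z : String) (q : String) (f10 : List (String × String × String × String × String × String × String × String × String × String)) : List String × List String × List String :=
  let ten := n10First z q 10 f10
  (ten.take 1, ten.take 5, ten.take 10)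

-- ===== PRECONDITION & SPEC =====
def Spec_n10 (z : String) (q : String) (f10 : List (String × String × String × String × String × String × String × String × String × String)) (out : List String × List String × List String) : Prop := out = n10_alt z q f10
instance (z : String) (q : String) (f10 : List (String × String × String × String × String × String × String × String × String × String)) (out : List String × List String × List String) : Decidable (Spec_n10 z q f10 out) := by unfold Spec_n10; infer_instance

-- ===== CLAIM (what is proved, stated in full; the proofs are below) =====
def Claim_equal_n10 : Prop := ∀ (z : String) (q : String) (f10 : List (String × String × String × String × String × String × String × String × String × String)), Dom_n10 z q f10 → Spec_n10 z q f10 (n10 z q f10)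

-- ===== LEMMAS AND PROOFS =====

-- the predicate and e-projection shared by the two characterisations below (proof-only helpers)
def n10Pred (z : String) (q : String)
    (row : String × String × String × String × String × String × String × String × String × String) : Bool :=
  match row with
  | (_a, _b, _c, _d, _e, _f, _g, h, i, _j) => h = z ∧ i = q

def n10Proj (row : String × String × String × String × String × String × String × String × String × String) : String :=
  match row with
  | (_a, _b, _c, _d, e, _f, _g, _h, _i, _j) => e

-- B's budgeted search returns the k-prefix of the matching e-values
theorem pv_first_eq (z q : String) (k : Nat)
    (l : List (String × String × String × String × String × String × String × String × String × String)) :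
    n10First z q k l = ((l.filter (n10Pred z q)).map n10Proj).take k := by
  induction l generalizing k with
  | nil => cases k <;> simp [n10First]
  | cons r l ih =>
    obtain ⟨a, b, c', d, e, f, g, h, i, j⟩ := r
    cases k with
    | zero => simp [n10First]
    | succ k =>
      by_cases hm : h = z ∧ i = q
      · simp [n10First, hm, List.filter_cons, n10Pred, n10Proj, ih]
      · have hp : n10Pred z q (a, b, c', d, e, f, g, h, i, j) = false := by
          simp [n10Pred, hm]
        simp [n10First, hm, List.filter_cons, hp, ih]

-- take with an Int count through toNat, peeling one cons
theorem pv_take_toNat (k c : Int) (e : String) (m : List String) :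
    List.take (k - c).toNat (e :: m) = if c + 1 ≤ k then e :: List.take (k - (c + 1)).toNat m else [] := by
  by_cases h : c + 1 ≤ k
  · have h1 : (k - c).toNat = (k - (c + 1)).toNat + 1 := by omega
    simp [h, h1]
  · have h1 : (k - c).toNat = 0 := by omega
    simp [h, h1]

-- loop invariant for A's fold: from accumulators (x, y, w) and counter c ≥ 0, the fold appends
-- the prefixes of lengths (1-c), (5-c), (10-c) of the matching e-values of the remaining rows.
theorem pv_loop_inv (z q : String)
    (l : List (String × String × String × String × String × String × String × String × String × String))
    (x y w : List String) (c : Int) (hc : 0 ≤ c) :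
    l.foldl (n10Step z q) (x, y, w, c)
    = (let m := (l.filter (n10Pred z q)).map n10Proj;
       (x ++ m.take (1 - c).toNat, y ++ m.take (5 - c).toNat, w ++ m.take (10 - c).toNat, c + m.length)) := by
  induction l generalizing x y w c with
  | nil => simp
  | cons r l ih =>
    obtain ⟨a, b, c', d, e, f, g, h, i, j⟩ := r
    rw [List.foldl_cons]
    by_cases hm : h = z ∧ i = q
    · have hstep : n10Step z q (x, y, w, c) (a, b, c', d, e, f, g, h, i, j)
          = (if c + 1 = 1 then x ++ [e] else x, if c + 1 ≤ 5 then y ++ [e] else y,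
             if c + 1 ≤ 10 then w ++ [e] else w, c + 1) := by
        simp [n10Step, hm]
      rw [hstep, ih _ _ _ (c + 1) (by omega)]
      simp only [List.filter_cons, n10Pred, hm, decide_true, and_self, if_true, List.map_cons,
        List.length_cons, Prod.mk.injEq]
      have e1 : (c + 1 = 1) ↔ (c + 1 ≤ (1:Int)) := by omega
      refine ⟨?_, ?_, ?_, ?_⟩
      · rw [pv_take_toNat]; simp only [e1]; split_ifs with hk
        · simp [n10Proj]
        · have h0 : ((1:Int) - (c + 1)).toNat = 0 := by omega
          rw [h0]; simp
      · rw [pv_take_toNat]; split_ifs with hk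
        · simp [n10Proj]
        · have h0 : ((5:Int) - (c + 1)).toNat = 0 := by omega
          rw [h0]; simp
      · rw [pv_take_toNat]; split_ifs with hk
        · simp [n10Proj]
        · have h0 : ((10:Int) - (c + 1)).toNat = 0 := by omega
          rw [h0]; simp
      · push_cast; ring
    · have hstep : n10Step z q (x, y, w, c) (a, b, c', d, e, f, g, h, i, j) = (x, y, w, c) := by
        simp [n10Step, hm]
      rw [hstep, ih _ _ _ c hc]
      have hp : n10Pred z q (a, b, c', d, e, f, g, h, i, j) = false := by
        simp [n10Pred, hm]
      simp [hp]

-- ===== VERDICT (by name: the statement is the Claim_ definition above) =====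
theorem n10_spec : Claim_equal_n10 := by
  intro z q f10 _
  unfold Spec_n10 n10 n10_alt
  rw [pv_loop_inv z q f10 [] [] [] 0 le_rfl, pv_first_eq]
  simp [List.take_take]
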